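-- pv_equiv track=rewrite | github.com/curtiscali/project-euler | 24/soln24.py | find_kl
-- ===== SOURCE A (Python) =====
-- def find_kl(permutation):
--     k = None
--     for i in range(len(permutation) - 1):
--         if permutation[i] < permutation[i+1]:
--             k = i
--     if k is None:
--         return None
--     else:
--         l = None
--         for (i, value) in enumerate(permutation):
--             if value > permutation[k]:
--                 l = i
--         return (k, l)
-- ===== SOURCE B (Python) =====
-- def _rscan_first(pred, start):
--     # first index i in start, start-1, ..., 0 with pred(i); None if none
--     for i in range(start, -1, -1):
--         if pred(i):
--             return i
--     return None
--
--
-- def find_kl(permutation):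
--     n = len(permutation)
--     k = _rscan_first(lambda i: permutation[i] < permutation[i + 1], n - 2)
--     if k is None:
--         return None
--     l = _rscan_first(lambda i: permutation[i] > permutation[k], n - 1)
--     return (k, l)
-- ===== Notes on version B (the rewrite author's own statement) =====
-- stated objective: idiomatic
-- what changed: Both scans now run right-to-left and stop at the first match (the standard next-permutation idiom, via one shared right-scan helper), instead of A's left-to-right passes that keep overwriting the last match.
import Mathlib
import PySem

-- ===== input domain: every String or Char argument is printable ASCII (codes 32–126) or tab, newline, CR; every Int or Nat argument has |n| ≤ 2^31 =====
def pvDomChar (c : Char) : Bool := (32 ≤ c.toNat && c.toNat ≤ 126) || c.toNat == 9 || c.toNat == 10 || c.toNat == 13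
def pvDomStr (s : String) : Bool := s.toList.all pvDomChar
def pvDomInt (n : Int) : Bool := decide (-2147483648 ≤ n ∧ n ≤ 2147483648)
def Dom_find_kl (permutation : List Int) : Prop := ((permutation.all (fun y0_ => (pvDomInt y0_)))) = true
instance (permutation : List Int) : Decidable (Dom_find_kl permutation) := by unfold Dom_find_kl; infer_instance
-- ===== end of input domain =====

-- B right-to-left: both scans stop at the first match instead of A's keep-last forward passes.

-- ===== PORT A =====
-- A: forward pass keeping the LAST i with perm[i] < perm[i+1]; then a forward
-- enumerate pass keeping the LAST i with perm[i] > perm[k].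
def find_kl (permutation : List Int) : Option (Int × Int) :=
  let k := (PySem.List.pyRange 0 ((permutation.length : Int) - 1) 1).foldl
    (fun acc i =>
      if PySem.List.pyGetD permutation i 0 < PySem.List.pyGetD permutation (i + 1) 0 then some i
      else acc) none
  match k with
  | none => none
  | some k =>
    let l := (PySem.List.enumerate permutation 0).foldl
      (fun acc p => if p.2 > PySem.List.pyGetD permutation k 0 then some p.1 else acc) none
    -- l = none is unreachable here (perm[k] < perm[k+1] makes the test fire at k+1),
    -- so the .getD 0 default is never used
    some (k, l.getD 0)

-- ===== PORT B =====
-- first index i in start, start-1, ..., 0 with p i; none if start < 0 or no match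
def rscanFirst (p : Int → Bool) (i : Int) : Option Int :=
  if h : i < 0 then none
  else if p i then some i else rscanFirst p (i - 1)
termination_by (i + 1).toNat
decreasing_by simp at h; omega

def find_kl_alt (permutation : List Int) : Option (Int × Int) :=
  let n : Int := permutation.length
  match rscanFirst
      (fun i => PySem.List.pyGetD permutation i 0 < PySem.List.pyGetD permutation (i + 1) 0)
      (n - 2) with
  | none => none
  | some k =>
    match rscanFirst
        (fun i => PySem.List.pyGetD permutation i 0 > PySem.List.pyGetD permutation k 0)
        (n - 1) with
    | some l => some (k, l)
    | none => none

-- ===== PRECONDITION & SPEC =====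
def Spec_find_kl (permutation : List Int) (out : Option (Int × Int)) : Prop := out = find_kl_alt permutation
instance (permutation : List Int) (out : Option (Int × Int)) : Decidable (Spec_find_kl permutation out) := by unfold Spec_find_kl; infer_instance

-- ===== CLAIM (what is proved, stated in full; the proofs are below) =====
def Claim_equal_find_kl : Prop := ∀ (permutation : List Int), Dom_find_kl permutation → Spec_find_kl permutation (find_kl permutation)

-- ===== LEMMAS AND PROOFS =====

-- unfolding lemmas for rscanFirst
theorem rscanFirst_neg (p : Int → Bool) (i : Int) (h : i < 0) : rscanFirst p i = none := by
  rw [rscanFirst]; simp [h]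

theorem rscanFirst_step (p : Int → Bool) (i : Int) (h : 0 ≤ i) :
    rscanFirst p i = if p i then some i else rscanFirst p (i - 1) := by
  rw [rscanFirst]; simp [show ¬ i < 0 by omega]

-- rscanFirst only looks at p on [0, i]
theorem rscanFirst_congr (p q : Int → Bool) (i : Int)
    (h : ∀ j, 0 ≤ j → j ≤ i → p j = q j) : rscanFirst p i = rscanFirst q i := by
  by_cases hi : i < 0
  · rw [rscanFirst_neg p i hi, rscanFirst_neg q i hi]
  · push_neg at hi
    rw [rscanFirst_step p i hi, rscanFirst_step q i hi, h i hi le_rfl]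
    have := rscanFirst_congr p q (i - 1) (fun j h0 h1 => h j h0 (by omega))
    rw [this]
termination_by (i + 1).toNat
decreasing_by omega

-- a keep-last forward fold over range(0, m) is a first-match backward scan from m-1
theorem foldl_last_eq_rscanFirst (p : Int → Bool) (m : Nat) (acc : Option Int)
    (hacc : acc = none) :
    (PySem.List.pyRange 0 (m : Int) 1).foldl (fun acc i => if p i then some i else acc) acc
      = rscanFirst p ((m : Int) - 1) := by
  induction m with
  | zero =>
    rw [PySem.List.pyRange_one_eq_nil (by omega)]
    simp [hacc, rscanFirst_neg p (-1) (by omega)]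
  | succ m ih =>
    have : ((m + 1 : Nat) : Int) = (m : Int) + 1 := by push_cast; ring
    rw [this, PySem.List.pyRange_one_succ_right (by omega), List.foldl_append]
    rw [rscanFirst_step p ((m : Int) + 1 - 1) (by omega)]
    simp only [List.foldl_cons, List.foldl_nil, show (m : Int) + 1 - 1 = (m : Int) by ring]
    by_cases hp : p m
    · simp [hp]
    · simp [hp, ih]

theorem rscanFirst_eq_some (p : Int → Bool) (i k : Int) (h : rscanFirst p i = some k) :
    0 ≤ k ∧ k ≤ i ∧ p k = true := by
  by_cases hi : i < 0
  · rw [rscanFirst_neg p i hi] at h; exact absurd h (by simp)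
  · push_neg at hi
    rw [rscanFirst_step p i hi] at h
    by_cases hp : p i
    · simp [hp] at h; subst h; exact ⟨hi, le_rfl, hp⟩
    · simp [hp] at h
      obtain ⟨h0, h1, h2⟩ := rscanFirst_eq_some p (i - 1) k h
      exact ⟨h0, by omega, h2⟩
termination_by (i + 1).toNat
decreasing_by omega

theorem rscanFirst_isSome (p : Int → Bool) (i j : Int) (h0 : 0 ≤ j) (hj : j ≤ i)
    (hp : p j = true) : (rscanFirst p i).isSome := by
  rw [rscanFirst_step p i (by omega)]
  by_cases hpi : p i
  · simp [hpi]
  · simp only [hpi]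
    have hji : j ≠ i := fun he => hpi (he ▸ hp)
    exact rscanFirst_isSome p (i - 1) j h0 (by omega) hp
termination_by (i + 1).toNat
decreasing_by omega

-- enumerate over a snoc
theorem enumerate_append_singleton {α : Type} (ys : List α) (y : α) (s : Int) :
    PySem.List.enumerate (ys ++ [y]) s = PySem.List.enumerate ys s ++ [(s + ys.length, y)] := by
  induction ys generalizing s with
  | nil => simp [PySem.List.enumerate_cons, PySem.List.enumerate_nil]
  | cons x xs ih =>
    simp [PySem.List.enumerate_cons, ih (s + 1)]
    ring_nf

-- pyGetD on the left part of an append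
theorem pyGetD_append_left (ys : List Int) (y : Int) (j : Int) (h0 : 0 ≤ j)
    (hj : j < ys.length) :
    PySem.List.pyGetD (ys ++ [y]) j 0 = PySem.List.pyGetD ys j 0 := by
  rw [PySem.List.pyGetD_eq_getElem _ 0 h0 (by simp; omega),
      PySem.List.pyGetD_eq_getElem _ 0 h0 hj]
  rw [List.getElem_append_left (by omega)]

theorem pyGetD_append_last (ys : List Int) (y : Int) :
    PySem.List.pyGetD (ys ++ [y]) (ys.length : Int) 0 = y := by
  rw [PySem.List.pyGetD_eq_getElem _ 0 (by omega) (by simp)]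
  simp

-- A's keep-last enumerate pass is B's backward first-match over the indices
theorem enumerate_foldl_eq_rscanFirst (xs : List Int) (q : Int → Bool) :
    (PySem.List.enumerate xs 0).foldl (fun acc p => if q p.2 then some p.1 else acc) none
      = rscanFirst (fun i => q (PySem.List.pyGetD xs i 0)) ((xs.length : Int) - 1) := by
  induction xs using List.reverseRecOn with
  | nil =>
    simp [PySem.List.enumerate_nil, rscanFirst_neg _ (-1) (by omega)]
  | append_singleton ys y ih =>
    rw [enumerate_append_singleton, List.foldl_append]
    simp only [List.foldl_cons, List.foldl_nil, zero_add]
    have hlen : ((ys ++ [y]).length : Int) - 1 = (ys.length : Int) := by simp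
    rw [hlen, rscanFirst_step _ (ys.length : Int) (by omega)]
    rw [pyGetD_append_last ys y]
    by_cases hq : q y
    · simp [hq]
    · simp only [hq]
      rw [ih]
      exact rscanFirst_congr _ _ _ (fun j h0 h1 => by
        rw [pyGetD_append_left ys y j h0 (by omega)])

-- ===== VERDICT (by name: the statement is the Claim_ definition above) =====
theorem find_kl_spec : Claim_equal_find_kl := by
  intro perm _
  unfold Spec_find_kl find_kl find_kl_alt
  simp only []
  by_cases hn : perm.length = 0
  · -- empty list: both scans are vacuous
    have hperm : perm = [] := List.length_eq_zero_iff.mp hn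
    subst hperm
    rw [show ((([] : List Int).length : Int) - 1) = -1 by simp,
        PySem.List.pyRange_one_eq_nil (by omega),
        rscanFirst_neg _ ((([] : List Int).length : Int) - 2) (by simp)]
    simp
  · have h1 : 1 ≤ perm.length := by omega
    have hm : ((perm.length - 1 : Nat) : Int) = (perm.length : Int) - 1 := by push_cast; omega
    have hk := foldl_last_eq_rscanFirst
      (fun i => decide (PySem.List.pyGetD perm i 0 < PySem.List.pyGetD perm (i + 1) 0))
      (perm.length - 1) none rfl
    rw [hm, show (perm.length : Int) - 1 - 1 = (perm.length : Int) - 2 by ring] at hk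
    simp only [decide_eq_true_eq] at hk
    rw [hk]
    cases hks : rscanFirst
        (fun i => decide (PySem.List.pyGetD perm i 0 < PySem.List.pyGetD perm (i + 1) 0))
        ((perm.length : Int) - 2) with
    | none => rfl
    | some k =>
      simp only []
      obtain ⟨hk0, hk1, hk2⟩ := rscanFirst_eq_some _ _ _ hks
      have hl := enumerate_foldl_eq_rscanFirst perm
        (fun v => decide (v > PySem.List.pyGetD perm k 0))
      simp only [decide_eq_true_eq] at hl
      rw [hl]
      -- the l scan always succeeds: the test fires at index k + 1
      have hsome : (rscanFirst
          (fun i => decide (PySem.List.pyGetD perm i 0 > PySem.List.pyGetD perm k 0))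
          ((perm.length : Int) - 1)).isSome := by
        apply rscanFirst_isSome _ _ (k + 1) (by omega) (by omega)
        simpa [gt_iff_lt] using hk2
      cases hls : rscanFirst
          (fun i => decide (PySem.List.pyGetD perm i 0 > PySem.List.pyGetD perm k 0))
          ((perm.length : Int) - 1) with
      | none => rw [hls] at hsome; simp at hsome
      | some l => simp
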